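-- pv_equiv track=rewrite | github.com/ajfisher/agentrunner | agentrunner/scripts/status_artifact.py | summarize_checks
-- ===== SOURCE A (Python) =====
-- from typing import Any
--
-- def summarize_checks(checks: Any) -> str | None:
--     if not isinstance(checks, list) or not checks:
--         return None
--     total = len(checks)
--     ok = blocked = error = other = 0
--     for check in checks:
--         status = check.get("status") if isinstance(check, dict) else None
--         status = str(status or "").lower()
--         if status == "ok":
--             ok += 1
--         elif status == "blocked":
--             blocked += 1
--         elif status == "error":
--             error += 1
--         else:
--             other += 1
--     parts = [f"checks {ok}/{total} ok"]
--     if blocked: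
--         parts.append(f"{blocked} blocked")
--     if error:
--         parts.append(f"{error} error")
--     if other:
--         parts.append(f"{other} other")
--     return ", ".join(parts)
-- ===== SOURCE B (Python) =====
-- from typing import Any
--
-- def summarize_checks(checks: Any) -> str | None:
--     if not isinstance(checks, list) or not checks:
--         return None
--     statuses = [
--         str((c.get("status") if isinstance(c, dict) else None) or "").lower()
--         for c in checks
--     ]
--     total = len(statuses)
--     ok = statuses.count("ok")
--     blocked = statuses.count("blocked")
--     error = statuses.count("error")
--     other = total - ok - blocked - error
--     parts = [f"checks {ok}/{total} ok"] + [
--         f"{n} {name}"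
--         for n, name in ((blocked, "blocked"), (error, "error"), (other, "other"))
--         if n
--     ]
--     return ", ".join(parts)
-- ===== Notes on version B (the rewrite author's own statement) =====
-- stated objective: idiomatic
-- what changed: A's single pass with an if/elif/else chain over four running counters is replaced by staged passes: first map each check to its normalized status, then take ok/blocked/error as list.count over that list, derive 'other' by subtraction, and build the tail of the summary with a filtering comprehension instead of sequential if-appends.
import Mathlib
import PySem

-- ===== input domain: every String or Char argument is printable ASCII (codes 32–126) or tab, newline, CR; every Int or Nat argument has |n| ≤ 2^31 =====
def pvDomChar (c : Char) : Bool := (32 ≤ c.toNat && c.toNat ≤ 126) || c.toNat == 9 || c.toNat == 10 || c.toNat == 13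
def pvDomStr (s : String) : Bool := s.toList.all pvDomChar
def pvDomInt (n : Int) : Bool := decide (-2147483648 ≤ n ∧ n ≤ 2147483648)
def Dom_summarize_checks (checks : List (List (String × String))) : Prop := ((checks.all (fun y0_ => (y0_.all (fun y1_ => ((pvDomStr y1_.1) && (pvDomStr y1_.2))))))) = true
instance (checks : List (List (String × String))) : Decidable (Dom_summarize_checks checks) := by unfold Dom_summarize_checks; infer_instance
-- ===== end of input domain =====

-- B replaces A's one-pass if/elif/else counter loop by staged passes: map the checks to
-- their normalized statuses, count "ok"/"blocked"/"error" in that list, derive `other`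
-- by subtraction, and build the summary tail with a filtering comprehension
-- (objective: more idiomatic; same cost).

-- `str(check.get("status") or "").lower()` (the same normalization in A and B)
def pvNorm (check : List (String × String)) : String :=
  PySem.Str.lower (((PySem.Dict.mk check).get? "status").getD "")

-- ===== PORT A =====
def summarize_checks (checks : List (List (String × String))) : Option String :=
  if checks.isEmpty then none
  else
    let total : Int := PySem.List.len checks
    let c : Int × Int × Int × Int := checks.foldl (fun s check =>
      let status := pvNorm check
      if status = "ok" then (s.1 + 1, s.2.1, s.2.2.1, s.2.2.2)
      else if status = "blocked" then (s.1, s.2.1 + 1, s.2.2.1, s.2.2.2)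
      else if status = "error" then (s.1, s.2.1, s.2.2.1 + 1, s.2.2.2)
      else (s.1, s.2.1, s.2.2.1, s.2.2.2 + 1)) (0, 0, 0, 0)
    let parts := ["checks " ++ PySem.Int.toStr c.1 ++ "/" ++ PySem.Int.toStr total ++ " ok"]
    let parts := if c.2.1 ≠ 0 then parts ++ [PySem.Int.toStr c.2.1 ++ " blocked"] else parts
    let parts := if c.2.2.1 ≠ 0 then parts ++ [PySem.Int.toStr c.2.2.1 ++ " error"] else parts
    let parts := if c.2.2.2 ≠ 0 then parts ++ [PySem.Int.toStr c.2.2.2 ++ " other"] else parts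
    some (PySem.Str.join ", " parts)

-- ===== PORT B =====
def summarize_checks_alt (checks : List (List (String × String))) : Option String :=
  if checks.isEmpty then none
  else
    let statuses := checks.map pvNorm
    let total : Int := PySem.List.len statuses
    let ok : Int := PySem.List.count statuses "ok"
    let blocked : Int := PySem.List.count statuses "blocked"
    let error : Int := PySem.List.count statuses "error"
    let other : Int := total - ok - blocked - error
    let parts := ["checks " ++ PySem.Int.toStr ok ++ "/" ++ PySem.Int.toStr total ++ " ok"]
      ++ (([(blocked, "blocked"), (error, "error"), (other, "other")].filter
            (fun p => p.1 ≠ 0)).map (fun p => PySem.Int.toStr p.1 ++ " " ++ p.2))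
    some (PySem.Str.join ", " parts)

-- ===== PRECONDITION & SPEC =====
def Spec_summarize_checks (checks : List (List (String × String))) (out : Option String) : Prop := out = summarize_checks_alt checks
instance (checks : List (List (String × String))) (out : Option String) : Decidable (Spec_summarize_checks checks out) := by unfold Spec_summarize_checks; infer_instance

-- ===== CLAIM (what is proved, stated in full; the proofs are below) =====
def Claim_equal_summarize_checks : Prop := ∀ (checks : List (List (String × String))), Dom_summarize_checks checks → Spec_summarize_checks checks (summarize_checks checks)

-- ===== LEMMAS AND PROOFS =====

-- the fall-through bucket: status matches none of the three named ones
def pvOther (s : String) : Bool := !(s == "ok" || s == "blocked" || s == "error")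

-- A's loop computes, from any start state, the three named counts plus the fall-through count
theorem pvFoldA (l : List (List (String × String))) (a b c d : Int) :
    l.foldl (fun s check =>
      let status := pvNorm check
      if status = "ok" then (s.1 + 1, s.2.1, s.2.2.1, s.2.2.2)
      else if status = "blocked" then (s.1, s.2.1 + 1, s.2.2.1, s.2.2.2)
      else if status = "error" then (s.1, s.2.1, s.2.2.1 + 1, s.2.2.2)
      else (s.1, s.2.1, s.2.2.1, s.2.2.2 + 1)) ((a, b, c, d) : Int × Int × Int × Int)
    = (a + (l.map pvNorm).count "ok",
       b + (l.map pvNorm).count "blocked",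
       c + (l.map pvNorm).count "error",
       d + (l.map pvNorm).countP pvOther) := by
  induction l generalizing a b c d with
  | nil => simp
  | cons x xs ih =>
    simp only [List.foldl_cons, List.map_cons, List.count_cons, List.countP_cons]
    by_cases h1 : pvNorm x = "ok"
    · have ho : pvOther (pvNorm x) = false := by simp [pvOther, h1]
      rw [if_pos h1, ih]
      simp [h1, ho]; omega
    · by_cases h2 : pvNorm x = "blocked"
      · have ho : pvOther (pvNorm x) = false := by simp [pvOther, h2]
        rw [if_neg h1, if_pos h2, ih]
        simp [h1, h2, ho]; omega
      · by_cases h3 : pvNorm x = "error"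
        · have ho : pvOther (pvNorm x) = false := by simp [pvOther, h3]
          rw [if_neg h1, if_neg h2, if_pos h3, ih]
          simp [h1, h2, h3, ho]; omega
        · have ho : pvOther (pvNorm x) = true := by simp [pvOther, h1, h2, h3]
          rw [if_neg h1, if_neg h2, if_neg h3, ih]
          simp [h1, h2, h3, ho]; omega

-- the four buckets partition the list
theorem pvPartition (m : List String) :
    m.count "ok" + m.count "blocked" + m.count "error"
      + m.countP pvOther = m.length := by
  induction m with
  | nil => simp
  | cons x xs ih =>
    by_cases h1 : x = "ok"
    · have ho : pvOther x = false := by simp [pvOther, h1]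
      simp only [List.count_cons, List.countP_cons, List.length_cons, ho]
      simp [h1]; omega
    · by_cases h2 : x = "blocked"
      · have ho : pvOther x = false := by simp [pvOther, h2]
        simp only [List.count_cons, List.countP_cons, List.length_cons, ho]
        simp [h1, h2]; omega
      · by_cases h3 : x = "error"
        · have ho : pvOther x = false := by simp [pvOther, h3]
          simp only [List.count_cons, List.countP_cons, List.length_cons, ho]
          simp [h1, h2, h3]; omega
        · have ho : pvOther x = true := by simp [pvOther, h1, h2, h3]
          simp only [List.count_cons, List.countP_cons, List.length_cons, ho]
          simp [h1, h2, h3]; omega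

-- A's three sequential conditional appends equal B's filtering comprehension
theorem pvParts (hd : String) (b e o : Int) :
    (let p1 := [hd]
     let p2 := if b ≠ 0 then p1 ++ [PySem.Int.toStr b ++ " blocked"] else p1
     let p3 := if e ≠ 0 then p2 ++ [PySem.Int.toStr e ++ " error"] else p2
     if o ≠ 0 then p3 ++ [PySem.Int.toStr o ++ " other"] else p3)
    = [hd] ++ (([(b, "blocked"), (e, "error"), (o, "other")].filter
        (fun p => p.1 ≠ 0)).map (fun p => PySem.Int.toStr p.1 ++ " " ++ p.2)) := by
  have c1 : (" " : String) ++ "blocked" = " blocked" := rfl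
  have c2 : (" " : String) ++ "error" = " error" := rfl
  have c3 : (" " : String) ++ "other" = " other" := rfl
  by_cases hb : b = 0 <;> by_cases he : e = 0 <;> by_cases ho : o = 0 <;>
    simp [hb, he, ho, List.filter, String.append_assoc, c1, c2, c3]

-- ===== VERDICT (by name: the statement is the Claim_ definition above) =====
theorem summarize_checks_spec : Claim_equal_summarize_checks := by
  intro checks _
  unfold Spec_summarize_checks summarize_checks summarize_checks_alt
  by_cases he : checks.isEmpty
  · simp [he]
  · simp only [he, if_neg]
    rw [pvFoldA]
    have hp := pvPartition (checks.map pvNorm)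
    have hcnt : ∀ v, PySem.List.count (checks.map pvNorm) v = ((checks.map pvNorm).count v : Int) := by
      intro v; simp [PySem.List.count_eq]
    simp only [zero_add, PySem.List.len_eq, hcnt, List.length_map]
    rw [pvParts]
    have hoth : ((checks.map pvNorm).countP pvOther : Int)
        = (checks.length : Int) - ((checks.map pvNorm).count "ok" : Int)
          - ((checks.map pvNorm).count "blocked" : Int) - ((checks.map pvNorm).count "error" : Int) := by
      have : (checks.map pvNorm).length = checks.length := by simp
      omega
    rw [hoth]
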